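-- pv_equiv track=rewrite | github.com/slidracoon72/leetcode | harshitaa_amazon.py | min_trips
-- ===== SOURCE A (Python) =====
-- from collections import Counter
--
-- def min_trips(packageweight):
--     # Count the frequency of each package weight
--     package_counts = Counter(packageweight)
--
--     # Sort the package weights in descending order
--     sorted_weights = sorted(package_counts.keys(), reverse=True)
--
--     trips = 0
--     remaining_packages = len(packageweight)
--
--     while remaining_packages > 0:
--         found_trip = False
--
--         # Try to form trips with three packages of the same weight
--         for weight in sorted_weights:
--             if package_counts[weight] >= 3:
--                 trips += 1
--                 package_counts[weight] -= 3
--                 remaining_packages -= 3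
--                 found_trip = True
--                 break
--
--         if not found_trip:
--             # Try to form trips with two packages of the same weight
--             for weight in sorted_weights:
--                 if package_counts[weight] >= 2:
--                     trips += 1
--                     package_counts[weight] -= 2
--                     remaining_packages -= 2
--                     found_trip = True
--                     break
--
--         if not found_trip:
--             # If neither 3 nor 2 packages of the same weight are available, it's not possible
--             return -1
--
--     return trips
-- ===== SOURCE B (Python) =====
-- from collections import Counter
--
-- def min_trips(packageweight):
--     counts = Counter(packageweight).values()
--     if any(c == 1 for c in counts):
--         return -1
--     return sum((c + 2) // 3 for c in counts)
-- ===== Notes on version B (the rewrite author's own statement) =====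
-- stated objective: faster
-- what changed: Replaces A's repeated greedy scan of the weight list (one scan per trip, taking triples before pairs) by a single closed-form pass over the Counter values: -1 if any count is 1, else sum of ceil(count/3).
-- intended difference: On inputs where some weight occurs c>=4 times with c%3==1 and no weight occurs exactly once, A's greedy (always removing triples first) strands one leftover package and returns -1, while B returns the achievable minimum sum(ceil(c/3)) (e.g. [1,1,1,1]: A=-1, B=2 via 2+2), which is the intended minimum number of trips. — e.g. on min_trips([1, 1, 1, 1]): A returns -1, B returns 2
import Mathlib
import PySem

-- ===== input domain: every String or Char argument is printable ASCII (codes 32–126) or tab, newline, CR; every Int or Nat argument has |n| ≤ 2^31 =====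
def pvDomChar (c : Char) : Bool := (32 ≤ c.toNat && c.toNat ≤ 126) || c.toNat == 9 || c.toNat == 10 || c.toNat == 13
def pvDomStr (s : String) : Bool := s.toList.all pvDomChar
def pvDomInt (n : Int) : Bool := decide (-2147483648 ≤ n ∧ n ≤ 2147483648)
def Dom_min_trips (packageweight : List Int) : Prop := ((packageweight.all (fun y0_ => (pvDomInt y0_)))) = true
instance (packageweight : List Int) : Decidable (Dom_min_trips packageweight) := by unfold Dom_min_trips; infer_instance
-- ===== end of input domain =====

-- B replaces A's repeated greedy scans (one scan of the weight list per trip) by one closed-form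
-- pass over the counts (-1 if a count is 1, else sum of ceil(c/3)); B also returns the intended
-- minimum where A's triples-first greedy strands a package (see D_min_trips below).


-- ===== PORT A =====
-- the 'while remaining_packages > 0' loop of A; each inner 'for weight in sorted_weights … break'
-- scan is a first-match search (List.find?), and 'package_counts[weight] -= 3' is Dict.modify
def min_trips_loop (ws : List Int) (d : PySem.Dict Int Int) (rem trips : Int) : Int :=
  if _h : 0 < rem then
    match ws.find? (fun w => decide (3 ≤ d.getD w 0)) with
    | some w => min_trips_loop ws (d.modify w 0 (· - 3)) (rem - 3) (trips + 1)
    | none =>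
      match ws.find? (fun w => decide (2 ≤ d.getD w 0)) with
      | some w => min_trips_loop ws (d.modify w 0 (· - 2)) (rem - 2) (trips + 1)
      | none => -1
  else trips
termination_by rem.toNat
decreasing_by all_goals omega

def min_trips (packageweight : List Int) : Int :=
  let package_counts := PySem.Dict.counter packageweight
  let sorted_weights := PySem.List.sorted package_counts.keys (fun x => x) true
  min_trips_loop sorted_weights package_counts (packageweight.length : Int) 0

-- ===== PORT B =====
def min_trips_alt (packageweight : List Int) : Int :=
  let counts := (PySem.Dict.counter packageweight).values
  if counts.any (fun c => c == 1) then -1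
  else (counts.map (fun c => PySem.Int.floordiv (c + 2) 3)).sum

-- ===== PRECONDITION & SPEC =====
-- On inputs where some weight occurs c ≥ 4 times with c % 3 = 1 and no weight occurs exactly
-- once, A's triples-first greedy strands one leftover package and returns -1, while B returns
-- the achievable minimum sum(ceil(c/3)), which is the intended minimum number of trips.
def D_min_trips (packageweight : List Int) : Prop :=
  (∃ x ∈ packageweight, 4 ≤ packageweight.count x ∧ packageweight.count x % 3 = 1) ∧
  (∀ x ∈ packageweight, packageweight.count x ≠ 1)
instance (packageweight : List Int) : Decidable (D_min_trips packageweight) := by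
  unfold D_min_trips; infer_instance

def Spec_min_trips (packageweight : List Int) (out : Int) : Prop :=
  ¬ D_min_trips packageweight → out = min_trips_alt packageweight
instance (packageweight : List Int) (out : Int) : Decidable (Spec_min_trips packageweight out) := by
  unfold Spec_min_trips; infer_instance

def pvDiffWitness_min_trips : List Int := [1, 1, 1, 1]
def pvDiffWitnessOut_min_trips : Int × Int := (-1, 2)

-- ===== CLAIM (what is proved, stated in full; the proofs are below) =====
def Claim_unchanged_min_trips : Prop := ∀ (packageweight : List Int), Dom_min_trips packageweight → Spec_min_trips packageweight (min_trips packageweight)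
def Claim_changed_min_trips : Prop := Dom_min_trips (pvDiffWitness_min_trips) ∧ D_min_trips (pvDiffWitness_min_trips) ∧ min_trips (pvDiffWitness_min_trips) = pvDiffWitnessOut_min_trips.1 ∧ min_trips_alt (pvDiffWitness_min_trips) = pvDiffWitnessOut_min_trips.2 ∧ pvDiffWitnessOut_min_trips.1 ≠ pvDiffWitnessOut_min_trips.2
def Claim_exact_min_trips : Prop := ∀ (packageweight : List Int), Dom_min_trips packageweight → D_min_trips packageweight → min_trips packageweight ≠ min_trips_alt packageweight

-- ===== LEMMAS AND PROOFS =====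

-- sum over a Nodup list of a pointwise-updated function
theorem pv_sum_map_update (ws : List Int) (g g' : Int → Int) (w : Int) (δ : Int)
    (hnd : ws.Nodup) (hw : w ∈ ws) (hgw : g' w = g w + δ)
    (hne : ∀ u ∈ ws, u ≠ w → g' u = g u) :
    (ws.map g').sum = (ws.map g).sum + δ := by
  induction ws with
  | nil => simp at hw
  | cons a t ih =>
    simp only [List.nodup_cons] at hnd
    rcases List.mem_cons.mp hw with h | h
    · subst h
      have ht : t.map g' = t.map g := by
        apply List.map_congr_left
        intro u hu
        exact hne u (List.mem_cons_of_mem _ hu) (fun e => hnd.1 (e ▸ hu))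
      simp [hgw, ht]; ring
    · have ha : g' a = g a := hne a (List.mem_cons_self) (fun e => hnd.1 (e ▸ h))
      have := ih hnd.2 h (fun u hu hne' => hne u (List.mem_cons_of_mem _ hu) hne')
      simp [ha, this]; ring

theorem pv_sum_nonpos (l : List Int) (h : ∀ x ∈ l, x ≤ 0) : l.sum ≤ 0 := by
  have := List.sum_le_sum (l := l) (f := id) (g := fun _ => (0:Int)) (by simpa using h)
  simpa using this

theorem pv_cast_sum (l : List Nat) : ((l.map (Nat.cast : Nat → Int)).sum) = (l.sum : Int) := by
  induction l with
  | nil => simp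
  | cons a t ih => simp only [List.map_cons, List.sum_cons, Nat.cast_add, ih]

-- the characterisation of A's loop: -1 iff some live count has residue 1 mod 3,
-- else trips + sum of ceil(count/3) over the scanned weights
theorem pv_loop_spec (ws : List Int) (hnd : ws.Nodup) :
    ∀ (d : PySem.Dict Int Int) (rem trips : Int),
    (∀ w ∈ ws, 0 ≤ d.getD w 0) → rem = (ws.map (fun w => d.getD w 0)).sum →
    min_trips_loop ws d rem trips =
      (if ∃ w ∈ ws, d.getD w 0 % 3 = 1 then -1
       else trips + (ws.map (fun w => PySem.Int.floordiv (d.getD w 0 + 2) 3)).sum) := by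
  intro d rem trips
  induction d, rem, trips using min_trips_loop.induct (ws := ws) with
  | case1 d rem trips hpos w hfind ih =>
    intro hnn hrem
    have hw : w ∈ ws := List.mem_of_find?_eq_some hfind
    have hc : 3 ≤ d.getD w 0 := by simpa using List.find?_some hfind
    have hgd : ∀ u ∈ ws, (d.modify w 0 (· - 3)).getD u 0 =
        if u = w then d.getD w 0 - 3 else d.getD u 0 := by
      intro u _; exact PySem.Dict.getD_modify d w u 0 _
    have hsum : (ws.map (fun u => (d.modify w 0 (· - 3)).getD u 0)).sum =
        (ws.map (fun u => d.getD u 0)).sum + (-3) := by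
      apply pv_sum_map_update ws _ _ w _ hnd hw
      · simp [hgd w hw]; ring
      · intro u hu hne; simp [hgd u hu, hne]
    rw [min_trips_loop, dif_pos hpos, hfind]
    show min_trips_loop ws (d.modify w 0 (· - 3)) (rem - 3) (trips + 1) = _
    have h1 := ih (by
        intro u hu; rw [hgd u hu]; split_ifs with e
        · omega
        · exact hnn u hu)
      (by rw [hsum, ← hrem]; ring)
    rw [h1]
    have hres : ∀ u ∈ ws, ((d.modify w 0 (· - 3)).getD u 0) % 3 = d.getD u 0 % 3 := by
      intro u hu; rw [hgd u hu]; split_ifs with e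
      · subst e; omega
      · rfl
    have hcond : (∃ u ∈ ws, (d.modify w 0 (· - 3)).getD u 0 % 3 = 1) ↔
        (∃ u ∈ ws, d.getD u 0 % 3 = 1) := by
      constructor
      · rintro ⟨u, hu, h1⟩; exact ⟨u, hu, (hres u hu) ▸ h1⟩
      · rintro ⟨u, hu, h1⟩; exact ⟨u, hu, (hres u hu).trans h1⟩
    have hfsum : (ws.map (fun u => PySem.Int.floordiv ((d.modify w 0 (· - 3)).getD u 0 + 2) 3)).sum =
        (ws.map (fun u => PySem.Int.floordiv (d.getD u 0 + 2) 3)).sum + (-1) := by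
      apply pv_sum_map_update ws _ _ w _ hnd hw
      · rw [hgd w hw, if_pos rfl]
        rw [PySem.Int.floordiv_eq_ediv_of_pos (show (0:Int) < 3 by norm_num),
            PySem.Int.floordiv_eq_ediv_of_pos (show (0:Int) < 3 by norm_num)]
        omega
      · intro u hu hne; rw [hgd u hu, if_neg hne]
    rw [hfsum]
    simp only [hcond]
    split_ifs <;> ring
  | case2 d rem trips hpos hnone3 w hfind ih =>
    intro hnn hrem
    have hw : w ∈ ws := List.mem_of_find?_eq_some hfind
    have hc2 : 2 ≤ d.getD w 0 := by simpa using List.find?_some hfind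
    have hlt3 : ∀ u ∈ ws, ¬ 3 ≤ d.getD u 0 := by
      intro u hu
      have := List.find?_eq_none.mp hnone3 u hu
      simpa using this
    have hc : d.getD w 0 = 2 := by have := hlt3 w hw; omega
    have hgd : ∀ u ∈ ws, (d.modify w 0 (· - 2)).getD u 0 =
        if u = w then d.getD w 0 - 2 else d.getD u 0 := by
      intro u _; exact PySem.Dict.getD_modify d w u 0 _
    have hsum : (ws.map (fun u => (d.modify w 0 (· - 2)).getD u 0)).sum =
        (ws.map (fun u => d.getD u 0)).sum + (-2) := by
      apply pv_sum_map_update ws _ _ w _ hnd hw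
      · simp [hgd w hw]; ring
      · intro u hu hne; simp [hgd u hu, hne]
    rw [min_trips_loop, dif_pos hpos, hnone3, hfind]
    show min_trips_loop ws (d.modify w 0 (· - 2)) (rem - 2) (trips + 1) = _
    have h1 := ih (by
        intro u hu; rw [hgd u hu]; split_ifs with e
        · omega
        · exact hnn u hu)
      (by rw [hsum, ← hrem]; ring)
    rw [h1]
    have hcond : (∃ u ∈ ws, (d.modify w 0 (· - 2)).getD u 0 % 3 = 1) ↔
        (∃ u ∈ ws, d.getD u 0 % 3 = 1) := by
      constructor
      · rintro ⟨u, hu, h1⟩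
        refine ⟨u, hu, ?_⟩
        rw [hgd u hu] at h1
        by_cases e : u = w
        · rw [if_pos e] at h1; subst e; omega
        · rwa [if_neg e] at h1
      · rintro ⟨u, hu, h1⟩
        refine ⟨u, hu, ?_⟩
        rw [hgd u hu]
        by_cases e : u = w
        · subst e; omega
        · rwa [if_neg e]
    have hfsum : (ws.map (fun u => PySem.Int.floordiv ((d.modify w 0 (· - 2)).getD u 0 + 2) 3)).sum =
        (ws.map (fun u => PySem.Int.floordiv (d.getD u 0 + 2) 3)).sum + (-1) := by
      apply pv_sum_map_update ws _ _ w _ hnd hw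
      · rw [hgd w hw, if_pos rfl, hc]
        decide
      · intro u hu hne; rw [hgd u hu, if_neg hne]
    rw [hfsum]
    simp only [hcond]
    split_ifs <;> ring
  | case3 d rem trips hpos hnone3 hnone2 =>
    intro hnn hrem
    have hlt2 : ∀ u ∈ ws, ¬ 2 ≤ d.getD u 0 := by
      intro u hu
      have := List.find?_eq_none.mp hnone2 u hu
      simpa using this
    have hex : ∃ u ∈ ws, d.getD u 0 = 1 := by
      by_contra h
      push Not at h
      have hle : ∀ x ∈ ws.map (fun u => d.getD u 0), x ≤ 0 := by
        intro x hx
        obtain ⟨u, hu, rfl⟩ := List.mem_map.mp hx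
        have := hnn u hu; have := hlt2 u hu; have := h u hu
        omega
      have := pv_sum_nonpos _ hle
      omega
    rw [min_trips_loop, dif_pos hpos, hnone3, hnone2]
    show (-1 : Int) = _
    rw [if_pos]
    obtain ⟨u, hu, h1⟩ := hex
    exact ⟨u, hu, by omega⟩
  | case4 d rem trips hpos =>
    intro hnn hrem
    have hz : ∀ u ∈ ws, d.getD u 0 = 0 := by
      intro u hu
      have h1 : d.getD u 0 ≤ (ws.map (fun w => d.getD w 0)).sum :=
        List.single_le_sum (by rintro x hx; obtain ⟨v, hv, rfl⟩ := List.mem_map.mp hx; exact hnn v hv)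
          _ (List.mem_map.mpr ⟨u, hu, rfl⟩)
      have := hnn u hu
      omega
    rw [min_trips_loop, dif_neg hpos]
    rw [if_neg, List.sum_eq_zero]
    · ring
    · intro x hx
      obtain ⟨u, hu, rfl⟩ := List.mem_map.mp hx
      rw [hz u hu]; decide
    · rintro ⟨u, hu, h1⟩
      rw [hz u hu] at h1
      omega

-- A as a closed form over the distinct weights
theorem pv_min_trips_eq (pw : List Int) :
    min_trips pw =
      (if ∃ w ∈ PySem.Set.ofList pw, ((pw.count w : Int)) % 3 = 1 then -1
       else ((PySem.Set.ofList pw).map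
              (fun w => PySem.Int.floordiv ((pw.count w : Int) + 2) 3)).sum) := by
  show min_trips_loop (PySem.List.sorted (PySem.Dict.counter pw).keys (fun x => x) true)
        (PySem.Dict.counter pw) (pw.length : Int) 0 = _
  have hperm : (PySem.List.sorted (PySem.Dict.counter pw).keys (fun x => x) true).Perm
      (PySem.Set.ofList pw) := by
    rw [← PySem.Dict.keys_counter pw]
    exact PySem.List.sorted_perm _ _ _
  have hnd : (PySem.List.sorted (PySem.Dict.counter pw).keys (fun x => x) true).Nodup :=
    hperm.symm.nodup (PySem.Set.nodup_ofList pw)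
  have hmapS : ∀ (f : Int → Int),
      ((PySem.List.sorted (PySem.Dict.counter pw).keys (fun x => x) true).map f).sum =
      ((PySem.Set.ofList pw).map f).sum := fun f => (hperm.map f).sum_eq
  have hpermD : (PySem.Set.ofList pw).Perm pw.dedup :=
    (List.perm_ext_iff_of_nodup (PySem.Set.nodup_ofList pw) (List.nodup_dedup pw)).mpr
      (fun x => by rw [PySem.Set.mem_ofList, List.mem_dedup])
  have hrem : (pw.length : Int) =
      ((PySem.List.sorted (PySem.Dict.counter pw).keys (fun x => x) true).map
        (fun w => (PySem.Dict.counter pw).getD w 0)).sum := by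
    rw [hmapS]
    have h1 : (PySem.Set.ofList pw).map (fun w => (PySem.Dict.counter pw).getD w 0) =
        (PySem.Set.ofList pw).map (fun w => (pw.count w : Int)) :=
      List.map_congr_left (fun k _ => PySem.Dict.getD_counter pw k)
    rw [h1, (hpermD.map _).sum_eq]
    have h2 : pw.dedup.map (fun w => (pw.count w : Int)) =
        (pw.dedup.map (fun w => pw.count w)).map (Nat.cast : Nat → Int) := by
      rw [List.map_map]; rfl
    rw [h2, pv_cast_sum, List.sum_map_count_dedup_eq_length]
  rw [pv_loop_spec _ hnd _ _ 0
      (fun w _ => by rw [PySem.Dict.getD_counter]; positivity) hrem]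
  have hcond : (∃ w ∈ PySem.List.sorted (PySem.Dict.counter pw).keys (fun x => x) true,
      (PySem.Dict.counter pw).getD w 0 % 3 = 1) ↔
      (∃ w ∈ PySem.Set.ofList pw, ((pw.count w : Int)) % 3 = 1) := by
    constructor
    · rintro ⟨u, hu, h1⟩
      rw [PySem.Dict.getD_counter] at h1
      exact ⟨u, hperm.mem_iff.mp hu, h1⟩
    · rintro ⟨u, hu, h1⟩
      exact ⟨u, hperm.mem_iff.mpr hu, by rwa [PySem.Dict.getD_counter]⟩
  simp only [hcond]
  split_ifs with h
  · rfl
  · rw [hmapS]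
    have h1 : (PySem.Set.ofList pw).map
        (fun w => PySem.Int.floordiv ((PySem.Dict.counter pw).getD w 0 + 2) 3) =
        (PySem.Set.ofList pw).map (fun w => PySem.Int.floordiv ((pw.count w : Int) + 2) 3) :=
      List.map_congr_left (fun k _ => by rw [PySem.Dict.getD_counter])
    rw [h1]; ring

-- B as a closed form over the distinct weights
theorem pv_min_trips_alt_eq (pw : List Int) :
    min_trips_alt pw =
      (if ∃ w ∈ PySem.Set.ofList pw, (pw.count w : Int) = 1 then -1
       else ((PySem.Set.ofList pw).map
              (fun w => PySem.Int.floordiv ((pw.count w : Int) + 2) 3)).sum) := by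
  have hv : (PySem.Dict.counter pw).values
      = (PySem.Set.ofList pw).map (fun k => (pw.count k : Int)) := by
    rw [PySem.Dict.values_eq_map_keys _ (PySem.Dict.nodup_keys_counter pw) 0,
        PySem.Dict.keys_counter]
    exact List.map_congr_left (fun k _ => PySem.Dict.getD_counter pw k)
  show (if ((PySem.Dict.counter pw).values.any fun c => c == 1) = true then (-1 : Int)
        else (((PySem.Dict.counter pw).values.map (fun c => PySem.Int.floordiv (c + 2) 3)).sum)) = _
  rw [hv, List.map_map]
  by_cases h : ∃ w ∈ PySem.Set.ofList pw, (pw.count w : Int) = 1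
  · have ha : ((PySem.Set.ofList pw).map (fun k => (pw.count k : Int))).any (fun c => c == 1) = true := by
      simp only [List.any_eq_true, List.mem_map]
      obtain ⟨w, hw, h1⟩ := h
      exact ⟨_, ⟨w, hw, rfl⟩, by simp [h1]⟩
    rw [ha, if_pos h, if_pos rfl]
  · have ha : ((PySem.Set.ofList pw).map (fun k => (pw.count k : Int))).any (fun c => c == 1) = false := by
      simp only [List.any_eq_false, List.mem_map]
      rintro c ⟨w, hw, rfl⟩
      simp only [beq_iff_eq]
      exact fun e => h ⟨w, hw, e⟩
    rw [ha, if_neg h]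
    simp only [Bool.false_eq_true, if_false]
    rfl

-- ===== VERDICT (by name: the statement is the Claim_ definition above) =====
theorem min_trips_spec : Claim_unchanged_min_trips := by
  intro pw _ hnD
  unfold D_min_trips at hnD
  rw [pv_min_trips_eq, pv_min_trips_alt_eq]
  have hcond : (∃ w ∈ PySem.Set.ofList pw, ((pw.count w : Int)) % 3 = 1) ↔
      (∃ w ∈ PySem.Set.ofList pw, (pw.count w : Int) = 1) := by
    constructor
    · rintro ⟨w, hw, h1⟩
      have hw' : w ∈ pw := (PySem.Set.mem_ofList _ _).mp hw
      have hres : pw.count w % 3 = 1 := by omega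
      by_cases h4 : 4 ≤ pw.count w
      · have hQ' : ¬ ∀ x ∈ pw, pw.count x ≠ 1 :=
          fun hQ => hnD ⟨⟨w, hw', h4, hres⟩, hQ⟩
        push Not at hQ'
        obtain ⟨x, hx, hcx⟩ := hQ'
        exact ⟨x, (PySem.Set.mem_ofList _ _).mpr hx, by omega⟩
      · exact ⟨w, hw, by omega⟩
    · rintro ⟨w, hw, h1⟩
      exact ⟨w, hw, by omega⟩
  simp only [hcond]

theorem min_trips_changed : Claim_changed_min_trips := by
  unfold Claim_changed_min_trips
  refine ⟨by decide, by decide, ?_, by decide, by decide⟩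
  rw [pv_min_trips_eq]; decide

theorem min_trips_tight : Claim_exact_min_trips := by
  intro pw _ hD
  obtain ⟨⟨x, hx, h4, hres⟩, hno1⟩ := hD
  rw [pv_min_trips_eq, pv_min_trips_alt_eq]
  rw [if_pos ⟨x, (PySem.Set.mem_ofList _ _).mpr hx, by omega⟩]
  rw [if_neg (by
    rintro ⟨w, hw, h1⟩
    exact hno1 w ((PySem.Set.mem_ofList _ _).mp hw) (by omega))]
  intro h
  have : 0 ≤ ((PySem.Set.ofList pw).map
      (fun w => PySem.Int.floordiv ((pw.count w : Int) + 2) 3)).sum := by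
    apply List.sum_nonneg
    intro y hy
    obtain ⟨w, _, rfl⟩ := List.mem_map.mp hy
    rw [PySem.Int.floordiv_eq_ediv_of_pos (show (0:Int) < 3 by norm_num)]
    have : (0:Int) ≤ (pw.count w : Int) := by positivity
    omega
  omega
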